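-- pv_equiv track=rewrite | github.com/sbeckstrand/aoc-2024 | day05/main.py | is_valid_update
-- ===== SOURCE A (Python) =====
-- def is_valid_update(ordered_pages: list[str], update: list[str]) -> bool:
--
--     next_pages = ordered_pages.copy()
--     for page in update:
--
--         if page in next_pages:
--             next_pages = next_pages[next_pages.index(page):]
--         else:
--             return False
--
--     return True
-- ===== SOURCE B (Python) =====
-- def is_valid_update(ordered_pages: list[str], update: list[str]) -> bool:
--     # Single pass over ordered_pages with a cursor into update (two-pointer merge).
--     j = 0
--     n = len(update)
--     for page in ordered_pages:
--         while j < n and update[j] == page: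
--             j += 1
--         if j == n:
--             break
--     return j == n
-- ===== Notes on version B (the rewrite author's own statement) =====
-- stated objective: faster
-- what changed: Replaces A's per-update-page membership test, index scan and slice of the remaining ordered list by a single two-pointer pass over ordered_pages that advances a cursor into update.
import Mathlib
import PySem

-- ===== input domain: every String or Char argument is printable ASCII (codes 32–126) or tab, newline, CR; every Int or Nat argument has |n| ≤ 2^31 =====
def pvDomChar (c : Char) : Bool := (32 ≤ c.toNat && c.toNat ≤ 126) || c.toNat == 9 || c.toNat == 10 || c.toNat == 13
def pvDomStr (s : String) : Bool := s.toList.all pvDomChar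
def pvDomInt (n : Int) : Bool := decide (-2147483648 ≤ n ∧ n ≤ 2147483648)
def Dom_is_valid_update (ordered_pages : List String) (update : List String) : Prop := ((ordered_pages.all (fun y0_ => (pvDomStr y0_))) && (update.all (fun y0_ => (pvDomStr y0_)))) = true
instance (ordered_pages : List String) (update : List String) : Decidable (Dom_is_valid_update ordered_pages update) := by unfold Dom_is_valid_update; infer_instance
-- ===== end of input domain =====

-- B replaces A's per-page scan-and-slice of ordered_pages (O(m·n)) by a single two-pointer
-- pass over ordered_pages with a cursor into update (O(n+m)); objective: faster.


-- ===== PORT A =====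
-- the 'for page in update' loop: state = next_pages (the current suffix)
def isValidLoopA (next_pages : List String) (update : List String) : Bool :=
  match update with
  | [] => true
  | page :: rest =>
    -- 'if page in next_pages: next_pages = next_pages[next_pages.index(page):] else: return False'
    match PySem.List.index? next_pages page with
    | some i => isValidLoopA (PySem.List.slice next_pages (some (i : Int)) none) rest
    | none => false

def is_valid_update (ordered_pages : List String) (update : List String) : Bool :=
  isValidLoopA ordered_pages update   -- next_pages = ordered_pages.copy()

-- ===== PORT B =====
-- 'while j < n and update[j] == page: j += 1'
def altWhileB (update : List String) (n : Nat) (page : String) (j : Nat) : Nat :=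
  if j < n ∧ update.getD j "" == page then altWhileB update n page (j + 1) else j
termination_by n - j

-- 'for page in ordered_pages: …; if j == n: break'
def altLoopB (update : List String) (n : Nat) (ordered_pages : List String) (j : Nat) : Bool :=
  match ordered_pages with
  | [] => j == n
  | page :: rest =>
    let j' := altWhileB update n page j
    if j' == n then true else altLoopB update n rest j'

def is_valid_update_alt (ordered_pages : List String) (update : List String) : Bool :=
  altLoopB update update.length ordered_pages 0

-- ===== PRECONDITION & SPEC =====
def Spec_is_valid_update (ordered_pages : List String) (update : List String) (out : Bool) : Prop := out = is_valid_update_alt ordered_pages update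
instance (ordered_pages : List String) (update : List String) (out : Bool) : Decidable (Spec_is_valid_update ordered_pages update out) := by unfold Spec_is_valid_update; infer_instance

-- ===== CLAIM (what is proved, stated in full; the proofs are below) =====
def Claim_equal_is_valid_update : Prop := ∀ (ordered_pages : List String) (update : List String), Dom_is_valid_update ordered_pages update → Spec_is_valid_update ordered_pages update (is_valid_update ordered_pages update)

-- ===== LEMMAS AND PROOFS =====

-- abstract version of B's loop over the remaining-update suffix
def bSpec (s u : List String) : Bool :=
  match s with
  | [] => u.isEmpty
  | page :: rest =>
    let u' := u.dropWhile (· == page)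
    if u'.isEmpty then true else bSpec rest u'

theorem altWhileB_le (update : List String) (page : String) (j : Nat)
    (h : j ≤ update.length) : altWhileB update update.length page j ≤ update.length := by
  unfold altWhileB
  split
  · exact altWhileB_le update page (j+1) (by omega)
  · exact h
termination_by update.length - j

theorem altWhileB_drop (update : List String) (page : String) (j : Nat) :
    update.drop (altWhileB update update.length page j)
      = (update.drop j).dropWhile (· == page) := by
  unfold altWhileB
  split
  · rename_i h
    obtain ⟨hj, heq⟩ := h
    rw [altWhileB_drop update page (j+1)]
    have hd : update.drop j = update[j] :: update.drop (j+1) := List.drop_eq_getElem_cons hj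
    rw [hd, List.dropWhile_cons_of_pos]
    simpa [List.getD, List.getElem?_eq_getElem hj] using heq
  · rename_i h
    rcases Nat.lt_or_ge j update.length with hj | hj
    · have hne : ¬ (update.getD j "" == page) = true := by
        intro hc; exact h ⟨hj, hc⟩
      have hd : update.drop j = update[j] :: update.drop (j+1) := List.drop_eq_getElem_cons hj
      rw [hd, List.dropWhile_cons_of_neg]
      simpa [List.getD, List.getElem?_eq_getElem hj] using hne
    · rw [List.drop_eq_nil_of_le hj, List.dropWhile_nil]
termination_by update.length - j

theorem altLoopB_eq_bSpec (update : List String) (ordered_pages : List String) (j : Nat)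
    (hj : j ≤ update.length) :
    altLoopB update update.length ordered_pages j = bSpec ordered_pages (update.drop j) := by
  induction ordered_pages generalizing j with
  | nil =>
    simp only [altLoopB, bSpec]
    rw [Bool.eq_iff_iff]
    simp only [beq_iff_eq, List.isEmpty_iff, List.drop_eq_nil_iff]
    omega
  | cons page rest ih =>
    simp only [altLoopB, bSpec]
    have hle := altWhileB_le update page j hj
    have hdrop := altWhileB_drop update page j
    by_cases hend : altWhileB update update.length page j = update.length
    · have hempty : ((update.drop j).dropWhile (· == page)).isEmpty = true := by
        rw [← hdrop, hend]
        simp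
      simp [hend, hempty]
    · have hne : (altWhileB update update.length page j == update.length) = false := by
        simp [hend]
      have hempty : ((update.drop j).dropWhile (· == page)).isEmpty = false := by
        rw [← hdrop]
        rcases Nat.lt_or_ge (altWhileB update update.length page j) update.length with h | h
        · simp only [List.isEmpty_eq_false_iff, ne_eq, List.drop_eq_nil_iff]
          omega
        · exact absurd (Nat.le_antisymm hle h) hend
      simp only [hne, hempty, Bool.false_eq_true, if_false]
      rw [ih _ hle, hdrop]

-- A skips a non-matching head of the suffix
theorem isValidLoopA_cons_ne (q : String) (s' : List String) (page : String) (rest : List String)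
    (hne : q ≠ page) :
    isValidLoopA (q :: s') (page :: rest) = isValidLoopA s' (page :: rest) := by
  rw [isValidLoopA, isValidLoopA, PySem.List.index?_cons_of_ne s' hne]
  cases h : PySem.List.index? s' page with
  | none => simp
  | some i =>
    simp only [Option.map_some, PySem.List.slice_from_natCast, List.drop_succ_cons]

theorem isValidLoopA_eq_bSpec (s u : List String) : isValidLoopA s u = bSpec s u := by
  induction hn : s.length + u.length using Nat.strong_induction_on generalizing s u with
  | _ n ih =>
  subst hn
  match s, u with
  | s, [] =>
    cases s <;> simp [isValidLoopA, bSpec]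
  | [], page :: rest =>
    simp [isValidLoopA, bSpec, PySem.List.index?]
  | q :: s', page :: rest =>
    by_cases hqp : q = page
    · subst hqp
      rw [isValidLoopA]
      simp only [PySem.List.index?_cons_self, PySem.List.slice_from_natCast, List.drop_zero]
      have h1 : isValidLoopA (q :: s') rest = bSpec (q :: s') rest :=
        ih _ (by simp) _ _ rfl
      rw [h1]
      simp only [bSpec]
      rw [List.dropWhile_cons_of_pos (by simp)]
    · rw [isValidLoopA_cons_ne q s' page rest hqp]
      have h1 : isValidLoopA s' (page :: rest) = bSpec s' (page :: rest) :=
        ih _ (by simp) _ _ rfl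
      rw [h1]
      conv_rhs => rw [bSpec]
      rw [List.dropWhile_cons_of_neg (by simp; intro h; exact hqp h.symm)]
      simp

-- ===== VERDICT (by name: the statement is the Claim_ definition above) =====
theorem is_valid_update_spec : Claim_equal_is_valid_update := by
  intro ordered_pages update _
  unfold Spec_is_valid_update is_valid_update is_valid_update_alt
  rw [isValidLoopA_eq_bSpec, altLoopB_eq_bSpec _ _ 0 (Nat.zero_le _)]
  simp
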